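-- pv_equiv track=rewrite | github.com/DHARSHANI-HAMBU/GUVIbeginner | armstrong2interval.py | arm
-- ===== SOURCE A (Python) =====
-- def arm(n1):
-- 	d=0
-- 	m=0
-- 	while n1>0:
-- 		d=n1%10
-- 		m+=d*d*d
-- 		n1=n1//10
-- 	return m
-- ===== SOURCE B (Python) =====
-- def arm(n1):
--     # sum of cubes of decimal digits, via the decimal string representation
--     if n1 <= 0:
--         return 0
--     return sum((ord(c) - 48) ** 3 for c in str(n1))
-- ===== Notes on version B (the rewrite author's own statement) =====
-- stated objective: idiomatic
-- what changed: Replaces the arithmetic mod/floordiv digit-extraction loop with a guard plus a single string-based pass: convert n1 to its decimal string and sum the cube of each digit character.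
import Mathlib
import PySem

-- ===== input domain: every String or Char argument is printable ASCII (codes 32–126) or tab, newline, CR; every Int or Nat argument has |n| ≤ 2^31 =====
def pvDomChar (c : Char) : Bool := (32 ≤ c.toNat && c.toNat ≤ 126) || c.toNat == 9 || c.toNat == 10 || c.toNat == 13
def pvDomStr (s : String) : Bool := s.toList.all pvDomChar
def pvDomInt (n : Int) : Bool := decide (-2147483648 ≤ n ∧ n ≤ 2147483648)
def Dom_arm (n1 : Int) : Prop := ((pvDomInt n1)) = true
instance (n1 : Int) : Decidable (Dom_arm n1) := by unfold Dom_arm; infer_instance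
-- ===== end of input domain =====

-- B replaces A's mod/floordiv digit-extraction loop with a string-based pass (idiomatic, same cost).

-- ===== PORT A =====
-- the while loop of A: state (n1, m)
def armLoop (n1 m : Int) : Int :=
  if _h : n1 > 0 then
    let d := PySem.Int.mod n1 10
    armLoop (PySem.Int.floordiv n1 10) (m + d * d * d)
  else m
termination_by n1.toNat
decreasing_by
  simp only [PySem.Int.floordiv, Int.fdiv_eq_ediv]
  omega

def arm (n1 : Int) : Int := armLoop n1 0

-- ===== PORT B =====
def arm_alt (n1 : Int) : Int :=
  if n1 ≤ 0 then 0
  else (((PySem.Int.toStr n1).toList).map (fun c => ((c.toNat : Int) - 48) ^ 3)).sum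

-- ===== PRECONDITION & SPEC =====
def Spec_arm (n1 : Int) (out : Int) : Prop := out = arm_alt n1
instance (n1 : Int) (out : Int) : Decidable (Spec_arm n1 out) := by unfold Spec_arm; infer_instance

-- ===== CLAIM (what is proved, stated in full; the proofs are below) =====
def Claim_equal_arm : Prop := ∀ (n1 : Int), Dom_arm n1 → Spec_arm n1 (arm n1)

-- ===== LEMMAS AND PROOFS =====

-- digit-cube sum of a natural number, mirroring the digit recursion
def natCubes (n : Nat) : Int :=
  if n = 0 then 0 else ((n % 10 : Nat) : Int) ^ 3 + natCubes (n / 10)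
decreasing_by omega

lemma natCubes_zero : natCubes 0 = 0 := by simp [natCubes]

lemma natCubes_pos (n : Nat) (h : n ≠ 0) :
    natCubes n = ((n % 10 : Nat) : Int) ^ 3 + natCubes (n / 10) := by
  rw [natCubes]; simp [h]

lemma armLoop_eq (k : Nat) : ∀ (n m : Int), n.toNat ≤ k → 0 ≤ n →
    armLoop n m = m + natCubes n.toNat := by
  induction k with
  | zero =>
    intro n m hk hn
    have hn0 : n = 0 := by omega
    subst hn0
    rw [armLoop.eq_def]; simp [natCubes_zero]
  | succ k ih =>
    intro n m hk hn
    rw [armLoop.eq_def]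
    by_cases h : n > 0
    · simp only [h, dif_pos]
      have hmod : PySem.Int.mod n 10 = ((n.toNat % 10 : Nat) : Int) := by
        simp [PySem.Int.mod, Int.fmod_eq_emod]; omega
      have hdiv : PySem.Int.floordiv n 10 = ((n.toNat / 10 : Nat) : Int) := by
        simp [PySem.Int.floordiv, Int.fdiv_eq_ediv]; omega
      have h2 : ((n.toNat / 10 : Nat) : Int).toNat ≤ k := by
        simp; omega
      rw [hmod, hdiv, ih _ _ h2 (by positivity)]
      rw [natCubes_pos n.toNat (by omega)]
      have : ((n.toNat / 10 : Nat) : Int).toNat = n.toNat / 10 := by omega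
      rw [this]
      ring
    · simp only [h, dif_neg, not_false_iff]
      have : n = 0 := by omega
      subst this
      simp [natCubes_zero]

-- digit character cubes: for d < 10, the string-digit cube equals d^3
lemma digitChar_cube (d : Nat) (hd : d < 10) :
    (((Nat.digitChar d).toNat : Int) - 48) ^ 3 = ((d : Nat) : Int) ^ 3 := by
  interval_cases d <;> decide

-- sum of digit-char cubes over toDigitsCore
lemma toDigitsCore_cubes (f : Nat) : ∀ (n : Nat) (acc : List Char), n < f →
    ((Nat.toDigitsCore 10 f n acc).map (fun c => ((c.toNat : Int) - 48) ^ 3)).sum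
      = natCubes n + ((acc.map (fun c => ((c.toNat : Int) - 48) ^ 3)).sum) := by
  induction f with
  | zero => intro n acc h; omega
  | succ f ih =>
    intro n acc h
    rw [Nat.toDigitsCore]
    by_cases h0 : n / 10 = 0
    · simp only [h0, if_true]
      rw [List.map_cons, List.sum_cons, digitChar_cube (n % 10) (by omega)]
      by_cases hn : n = 0
      · subst hn; simp [natCubes_zero]
      · rw [natCubes_pos n hn, h0, natCubes_zero]; ring
    · simp only [h0, if_false]
      have hn : n ≠ 0 := by omega
      have hlt : n / 10 < f := by omega
      rw [ih (n / 10) _ hlt]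
      rw [natCubes_pos n hn]
      simp [digitChar_cube (n % 10) (by omega)]
      ring

lemma toDigits_cubes (n : Nat) :
    ((Nat.toDigits 10 n).map (fun c => ((c.toNat : Int) - 48) ^ 3)).sum = natCubes n := by
  have := toDigitsCore_cubes (n + 1) n [] (by omega)
  simpa [Nat.toDigits] using this

-- ===== VERDICT (by name: the statement is the Claim_ definition above) =====
theorem arm_spec : Claim_equal_arm := by
  intro n1 _
  unfold Spec_arm arm arm_alt
  by_cases h : n1 ≤ 0
  · rw [armLoop.eq_def, dif_neg (by omega : ¬ n1 > 0), if_pos h]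
  · rw [armLoop_eq n1.toNat n1 0 le_rfl (by omega)]
    rw [if_neg h, zero_add]
    have htc : (PySem.Int.toStr n1).toList = Nat.toDigits 10 n1.toNat := by
      rw [PySem.Int.toList_toStr, PySem.Int.toChars, if_neg (by omega : ¬ n1 < 0)]
    rw [htc, toDigits_cubes]
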